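-- pv_equiv track=rewrite | github.com/ysidromdenis/sync-tabula-cloud | tabula_cloud_sync/utils/commons.py | validar_gtin
-- ===== SOURCE A (Python) =====
-- def validar_gtin(gtin) -> bool:
--     """Valida códigos GTIN-8, GTIN-12, GTIN-13 y GTIN-14."""
--     # Verificar si el GTIN contiene solo dígitos y tiene una longitud válida
--     if not gtin.isdigit() or len(gtin) not in [8, 12, 13, 14]:
--         return False
--
--     # Convertir el GTIN en una lista de enteros para facilitar el manejo
--     digitos = [int(d) for d in gtin]
--
--     # Inicializar la suma total
--     suma_total = 0
--
--     # La lógica de ponderación varía según la longitud del GTIN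
--     # Para GTIN-8, la ponderación comienza con 3 en la posición más a la izquierda
--     # Para GTIN-12, GTIN-13, y GTIN-14, comienza con 1
--     ponderacion = 3 if len(gtin) == 8 else 1
--
--     # Recorrer todos los dígitos excepto el último (dígito de control)
--     for i in range(len(digitos) - 1):
--         suma_total += digitos[i] * ponderacion
--         # Alternar la ponderación
--         ponderacion = 4 - ponderacion  # Esto alternará entre 3 y 1
--
--     # Calcular el dígito de control
--     digito_control_calculado = (10 - suma_total % 10) % 10
--
--     # Verificar si el dígito de control calculado coincide con el último dígito del GTIN
--     return digito_control_calculado == digitos[-1]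
-- ===== SOURCE B (Python) =====
-- def validar_gtin(gtin) -> bool:
--     """Valida códigos GTIN-8, GTIN-12, GTIN-13 y GTIN-14."""
--     if not gtin.isdigit() or len(gtin) not in [8, 12, 13, 14]:
--         return False
--     digitos = [int(d) for d in gtin]
--     # Split the body (all but the check digit) into even- and odd-indexed groups
--     cuerpo = digitos[:-1]
--     suma_par = sum(cuerpo[::2])
--     suma_impar = sum(cuerpo[1::2])
--     # GTIN-8 weighs even positions by 3; the longer formats weigh odd positions by 3
--     total = 3 * suma_par + suma_impar if len(gtin) == 8 else suma_par + 3 * suma_impar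
--     return (10 - total % 10) % 10 == digitos[-1]
-- ===== Notes on version B (the rewrite author's own statement) =====
-- stated objective: alternative
-- what changed: Replaces the stateful loop that alternates the weight between 3 and 1 with a slicing decomposition: the body is split into even- and odd-indexed halves, each summed once, and the weighted total is formed as a single length-dependent linear combination.
import Mathlib
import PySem

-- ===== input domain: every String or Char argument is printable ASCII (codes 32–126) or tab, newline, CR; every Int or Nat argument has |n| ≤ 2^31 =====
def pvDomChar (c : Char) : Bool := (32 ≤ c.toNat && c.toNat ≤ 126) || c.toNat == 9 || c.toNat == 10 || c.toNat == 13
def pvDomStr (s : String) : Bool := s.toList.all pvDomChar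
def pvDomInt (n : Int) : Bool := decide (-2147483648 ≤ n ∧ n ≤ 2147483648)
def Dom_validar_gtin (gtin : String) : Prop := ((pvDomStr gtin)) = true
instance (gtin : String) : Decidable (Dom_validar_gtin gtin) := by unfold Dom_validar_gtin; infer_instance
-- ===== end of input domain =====

-- B rewrites A's alternating-weight loop as two slice sums combined by one length-dependent formula (alternative decomposition, same cost).

-- ===== PORT A =====
-- int(d) for a one-character string d; both Pythons run it only on strings that passed isdigit()
def pyIntChar (c : Char) : Int := (PySem.Int.ofChars? [c]).getD 0

def validar_gtin (gtin : String) : Bool :=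
  if ¬ (PySem.Str.strIsdigit gtin = true) ∨ PySem.Str.len gtin ∉ ([8, 12, 13, 14] : List Int) then
    false
  else
    let digitos := gtin.toList.map pyIntChar
    let ponderacion : Int := if PySem.Str.len gtin = 8 then 3 else 1
    -- for i in range(len(digitos)-1): suma += digitos[i]*pond; pond := 4 - pond
    let st := (PySem.List.pyRange 0 (PySem.List.len digitos - 1) 1).foldl
      (fun (st : Int × Int) i => (st.1 + PySem.List.pyGetD digitos i 0 * st.2, 4 - st.2))
      (0, ponderacion)
    let digito_control_calculado := PySem.Int.mod (10 - PySem.Int.mod st.1 10) 10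
    decide (digito_control_calculado = PySem.List.pyGetD digitos (-1) 0)

-- ===== PORT B =====
def validar_gtin_alt (gtin : String) : Bool :=
  if ¬ (PySem.Str.strIsdigit gtin = true) ∨ PySem.Str.len gtin ∉ ([8, 12, 13, 14] : List Int) then
    false
  else
    let digitos := gtin.toList.map pyIntChar
    let cuerpo := PySem.List.slice digitos none (some (-1))          -- digitos[:-1]
    let suma_par := ((PySem.List.slice? cuerpo none none 2).getD []).sum     -- sum(cuerpo[::2])
    let suma_impar := ((PySem.List.slice? cuerpo (some 1) none 2).getD []).sum  -- sum(cuerpo[1::2])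
    let total : Int :=
      if PySem.Str.len gtin = 8 then 3 * suma_par + suma_impar else suma_par + 3 * suma_impar
    decide (PySem.Int.mod (10 - PySem.Int.mod total 10) 10 = PySem.List.pyGetD digitos (-1) 0)

-- ===== PRECONDITION & SPEC =====
def Spec_validar_gtin (gtin : String) (out : Bool) : Prop := out = validar_gtin_alt gtin
instance (gtin : String) (out : Bool) : Decidable (Spec_validar_gtin gtin out) := by unfold Spec_validar_gtin; infer_instance

-- ===== CLAIM (what is proved, stated in full; the proofs are below) =====
def Claim_equal_validar_gtin : Prop := ∀ (gtin : String), Dom_validar_gtin gtin → Spec_validar_gtin gtin (validar_gtin gtin)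

-- ===== LEMMAS AND PROOFS =====

/-- Even-indexed elements of a list. -/
def pvEvens {α : Type} : List α → List α
  | [] => []
  | [x] => [x]
  | x :: _ :: r => x :: pvEvens r

/-- Odd-indexed elements of a list. -/
def pvOdds {α : Type} (l : List α) : List α := pvEvens l.tail

theorem pvEvens_cons {α : Type} (a : α) (t : List α) : pvEvens (a :: t) = a :: pvOdds t := by
  cases t <;> rfl

theorem pvOdds_cons {α : Type} (a : α) (t : List α) : pvOdds (a :: t) = pvEvens t := rfl

/-- A's alternating fold computes the parity-weighted sums. -/
theorem pvFold_eq (l : List Int) (s p : Int) :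
    (l.foldl (fun (st : Int × Int) x => (st.1 + x * st.2, 4 - st.2)) (s, p)).1
      = s + p * (pvEvens l).sum + (4 - p) * (pvOdds l).sum := by
  induction l using pvEvens.induct generalizing s with
  | case1 => simp [pvEvens, pvOdds]
  | case2 x => simp [pvEvens, pvOdds]; ring
  | case3 x y r ih =>
    simp only [List.foldl_cons]
    rw [show (4 - (4 - p)) = p by ring, ih]
    simp only [pvEvens_cons, pvOdds_cons, List.sum_cons]
    ring

theorem pvFilterMap_even {α : Type} (xs : List α) :
    (List.range ((xs.length + 1) / 2)).filterMap (fun k => xs[2 * k]?) = pvEvens xs := by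
  induction xs using pvEvens.induct with
  | case1 => simp [pvEvens]
  | case2 x => simp [pvEvens]
  | case3 x y r ih =>
    have hlen : ((x :: y :: r).length + 1) / 2 = (r.length + 1) / 2 + 1 := by
      simp only [List.length_cons]; omega
    rw [hlen, List.range_succ_eq_map, List.filterMap_cons, List.filterMap_map]
    simp only [Function.comp_def]
    have hstep : ∀ k : Nat, (x :: y :: r)[2 * (k + 1)]? = r[2 * k]? := by
      intro k
      have : 2 * (k + 1) = 2 * k + 1 + 1 := by omega
      simp [this]
    simp only [hstep]
    simp [pvEvens_cons, pvOdds_cons, pvEvens_cons, ih]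

theorem pvSliceEven {α : Type} (xs : List α) :
    PySem.List.slice? xs none none 2 = some (pvEvens xs) := by
  simp only [PySem.List.slice?, PySem.List.sliceIndices]
  norm_num
  have h2 : ∀ k : Nat, ((2 : Int) * (k : Int)).toNat = 2 * k := by intro k; omega
  have hcnt :
      (if 0 < xs.length then (((xs.length : Int) + 2 - 1) / 2).toNat else 0)
        = (xs.length + 1) / 2 := by
    split_ifs with h
    · omega
    · omega
  rw [hcnt]
  rw [← pvFilterMap_even xs]
  apply List.filterMap_congr
  intro k _
  rw [h2]

theorem pvSliceOdd {α : Type} (xs : List α) :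
    PySem.List.slice? xs (some 1) none 2 = some (pvOdds xs) := by
  cases xs with
  | nil => rfl
  | cons x t =>
    simp only [PySem.List.slice?, PySem.List.sliceIndices]
    norm_num
    have hcnt :
        (if 0 < t.length then (((t.length : Int) + 2 - 1) / 2).toNat else 0)
          = (t.length + 1) / 2 := by
      split_ifs with h
      · omega
      · omega
    rw [hcnt]
    have hidx : ∀ k : Nat, (x :: t)[((1 : Int) + 2 * (k : Int)).toNat]? = t[2 * k]? := by
      intro k
      have h1 : ((1 : Int) + 2 * (k : Int)).toNat = 2 * k + 1 := by omega
      simp [h1]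
    rw [pvOdds_cons, ← pvFilterMap_even t]
    apply List.filterMap_congr
    intro k _
    exact hidx k

theorem validar_gtin_eq (gtin : String) : validar_gtin gtin = validar_gtin_alt gtin := by
  unfold validar_gtin validar_gtin_alt
  by_cases hg : ¬ (PySem.Str.strIsdigit gtin = true) ∨ PySem.Str.len gtin ∉ ([8, 12, 13, 14] : List Int)
  · rw [if_pos hg, if_pos hg]
  · rw [if_neg hg, if_neg hg]
    rw [not_or, not_not, not_not] at hg
    obtain ⟨hdig, hlen⟩ := hg
    simp only
    set digitos := gtin.toList.map pyIntChar with hdigs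
    have hlenD : digitos.length = gtin.toList.length := by simp [hdigs]
    have hlen8 : (gtin.toList.length : Int) ∈ ([8, 12, 13, 14] : List Int) := by
      simpa [PySem.Str.len_eq] using hlen
    have hpos : 1 ≤ digitos.length := by
      rw [hlenD]
      simp only [List.mem_cons, List.not_mem_nil, or_false] at hlen8
      omega
    have hbody : PySem.List.slice digitos none (some (-1)) = digitos.dropLast :=
      PySem.List.slice_to_neg_one digitos
    have hfold :
        ((PySem.List.pyRange 0 (PySem.List.len digitos - 1) 1).foldl
          (fun (st : Int × Int) i => (st.1 + PySem.List.pyGetD digitos i 0 * st.2, 4 - st.2))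
          (0, if PySem.Str.len gtin = 8 then (3:Int) else 1)).1
          = (digitos.dropLast.foldl
              (fun (st : Int × Int) x => (st.1 + x * st.2, 4 - st.2))
              (0, if PySem.Str.len gtin = 8 then (3:Int) else 1)).1 := by
      have hb : PySem.List.len digitos - 1 = PySem.List.len digitos.dropLast := by
        simp [PySem.List.len_eq, List.length_dropLast]
        omega
      rw [hb]
      congr 1
      rw [← PySem.List.foldl_pyRange_zero_pyGetD digitos.dropLast 0
            (fun (st : Int × Int) x => (st.1 + x * st.2, 4 - st.2))]
      apply PySem.List.foldl_congr_mem
      intro st i hi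
      have hi' := (PySem.List.mem_pyRange_one).mp hi
      have h0 : (0:Int) ≤ i := hi'.1
      have h1 : i < (digitos.dropLast.length : Int) := by
        simpa [PySem.List.len_eq] using hi'.2
      have h1' : i < (digitos.length : Int) := by
        simp only [List.length_dropLast] at h1; omega
      rw [PySem.List.pyGetD_eq_getElem (h0 := h0) (h1 := h1'),
          PySem.List.pyGetD_eq_getElem (h0 := h0) (h1 := h1)]
      congr 1
      rw [List.getElem_dropLast]
    rw [hfold, pvFold_eq, hbody, pvSliceEven, pvSliceOdd]
    simp only [Option.getD_some]
    have hsum :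
        (0 : Int) + (if PySem.Str.len gtin = 8 then (3:Int) else 1) * (pvEvens digitos.dropLast).sum
            + (4 - if PySem.Str.len gtin = 8 then (3:Int) else 1) * (pvOdds digitos.dropLast).sum
          = if PySem.Str.len gtin = 8 then
              3 * (pvEvens digitos.dropLast).sum + (pvOdds digitos.dropLast).sum
            else (pvEvens digitos.dropLast).sum + 3 * (pvOdds digitos.dropLast).sum := by
      by_cases h8 : PySem.Str.len gtin = 8
      · simp only [if_pos h8]; ring
      · simp only [if_neg h8]; ring
    rw [hsum]

-- ===== VERDICT (by name: the statement is the Claim_ definition above) =====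
theorem validar_gtin_spec : Claim_equal_validar_gtin := by
  intro gtin _
  unfold Spec_validar_gtin
  exact validar_gtin_eq gtin
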